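-- pv_equiv track=rewrite | github.com/alessandroliafook/P1 | unidade8/esteira_fabrica/esteira_fabrica.py | verifica_esteira
-- ===== SOURCE A (Python) =====
-- def verifica_esteira(l1,l2):
-- 	coincidencias = 0
-- 	indice = 0
-- 	for i_componente in range(len(l2)):
-- 		for i_busca in range(indice, len(l1)):
-- 			if l1[i_busca] == l2[i_componente]:
-- 				coincidencias += 1
-- 				indice = i_busca
-- 				break
-- 	if coincidencias == len(l2):
-- 		return True
-- 	else:
-- 		return False
-- ===== SOURCE B (Python) =====
-- def _bisect_left(lst, p):
--     # first index k with lst[k] >= p (lst is sorted ascending)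
--     lo, hi = 0, len(lst)
--     while lo < hi:
--         mid = (lo + hi) // 2
--         if lst[mid] < p:
--             lo = mid + 1
--         else:
--             hi = mid
--     return lo
--
-- def verifica_esteira(l1, l2):
--     pos = {}
--     for i, v in enumerate(l1):
--         pos.setdefault(v, []).append(i)
--     p = 0
--     for x in l2:
--         lst = pos.get(x, [])
--         k = _bisect_left(lst, p)
--         if k == len(lst):
--             return False
--         p = lst[k]
--     return True
-- ===== Notes on version B (the rewrite author's own statement) =====
-- stated objective: faster
-- what changed: replaces A's per-element linear rescan of l1 from the pointer with a precomputed value-to-sorted-positions dict queried by hand-written binary search for the first position >= pointer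
import Mathlib
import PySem

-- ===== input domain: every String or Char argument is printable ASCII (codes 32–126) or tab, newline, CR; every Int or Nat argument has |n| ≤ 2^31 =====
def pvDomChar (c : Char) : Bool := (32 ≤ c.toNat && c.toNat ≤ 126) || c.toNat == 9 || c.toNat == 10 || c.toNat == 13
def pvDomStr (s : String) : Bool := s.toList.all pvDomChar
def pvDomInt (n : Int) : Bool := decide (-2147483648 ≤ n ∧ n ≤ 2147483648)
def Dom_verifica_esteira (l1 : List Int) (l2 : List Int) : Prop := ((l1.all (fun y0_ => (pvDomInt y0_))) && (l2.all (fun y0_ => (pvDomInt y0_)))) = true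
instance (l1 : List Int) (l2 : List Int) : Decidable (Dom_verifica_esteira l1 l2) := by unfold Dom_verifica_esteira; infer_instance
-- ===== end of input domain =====

-- ===== PORT A =====
-- B changes only the return value computation; neither version mutates its arguments.
-- inner loop of A: scan indices i_busca from i upward for the first l1[i] == x
def busca (l1 : List Int) (x : Int) (i : Nat) : Option Nat :=
  if h : i < l1.length then
    if l1[i] = x then some i else busca l1 x (i + 1)
  else none
termination_by l1.length - i

def verifica_esteira (l1 : List Int) (l2 : List Int) : Bool :=
  let r := l2.foldl (fun (st : Nat × Nat) x =>
    match busca l1 x st.2 with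
    | some j => (st.1 + 1, j)
    | none => st) (0, 0)
  if r.1 = l2.length then true else false

-- ===== PORT B =====
-- header: B builds a value -> sorted positions dict once and binary-searches it per l2 element (faster; return value only, no mutation).
-- pos.setdefault(v, []).append(i) over enumerate(l1)
def posIdx (l1 : List Int) : PySem.Dict Int (List Nat) :=
  l1.zipIdx.foldl (fun d p => d.modify p.1 [] (· ++ [p.2])) PySem.Dict.empty

-- _bisect_left: first index k in [lo, hi) with lst[k] >= p
def bl (lst : List Nat) (p : Nat) (lo hi : Nat) : Nat :=
  if lo < hi then
    let mid := (lo + hi) / 2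
    if lst.getD mid 0 < p then bl lst p (mid + 1) hi else bl lst p lo mid
  else lo
termination_by hi - lo

def goAlt (pos : PySem.Dict Int (List Nat)) : List Int → Nat → Bool
  | [], _ => true
  | x :: rest, p =>
    let lst := pos.getD x []
    let k := bl lst p 0 lst.length
    if k = lst.length then false else goAlt pos rest (lst.getD k 0)

def verifica_esteira_alt (l1 : List Int) (l2 : List Int) : Bool :=
  goAlt (posIdx l1) l2 0

-- ===== PRECONDITION & SPEC =====
def Spec_verifica_esteira (l1 : List Int) (l2 : List Int) (out : Bool) : Prop := out = verifica_esteira_alt l1 l2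
instance (l1 : List Int) (l2 : List Int) (out : Bool) : Decidable (Spec_verifica_esteira l1 l2 out) := by unfold Spec_verifica_esteira; infer_instance

-- ===== CLAIM (what is proved, stated in full; the proofs are below) =====
def Claim_equal_verifica_esteira : Prop := ∀ (l1 : List Int) (l2 : List Int), Dom_verifica_esteira l1 l2 → Spec_verifica_esteira l1 l2 (verifica_esteira l1 l2)

-- ===== LEMMAS AND PROOFS =====

-- one-step unfolding of the A-side inner-loop scan
theorem busca_eq (l : List Int) (x : Int) (i : Nat) :
    busca l x i = if h : i < l.length then (if l[i] = x then some i else busca l x (i + 1)) else none := by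
  rw [busca]

-- one-step unfolding of the binary search
theorem bl_eq (lst : List Nat) (p lo hi : Nat) :
    bl lst p lo hi = if lo < hi then
      (if lst.getD ((lo + hi) / 2) 0 < p then bl lst p ((lo + hi) / 2 + 1) hi
       else bl lst p lo ((lo + hi) / 2))
    else lo := by
  rw [bl]

-- structural version of A's inner scan, carrying the absolute index
def buscaAux (l : List Int) (k : Nat) (x : Int) : Option Nat :=
  match l with
  | [] => none
  | y :: ys => if y = x then some k else buscaAux ys (k + 1) x

-- structural version with a lower bound p on the admissible index
def buscaAux2 (l : List Int) (k : Nat) (x : Int) (p : Nat) : Option Nat :=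
  match l with
  | [] => none
  | y :: ys => if y = x ∧ p ≤ k then some k else buscaAux2 ys (k + 1) x p

theorem busca_eq_drop (l : List Int) (x : Int) (i : Nat) :
    busca l x i = buscaAux (l.drop i) i x := by
  rw [busca_eq]
  by_cases h : i < l.length
  · rw [← List.getElem_cons_drop h]
    simp only [dif_pos h, buscaAux]
    split_ifs with hx
    · rfl
    · exact busca_eq_drop l x (i + 1)
  · have : l.drop i = [] := List.drop_eq_nil_of_le (by omega)
    simp [h, this, buscaAux]
termination_by l.length - i
decreasing_by omega

theorem buscaAux2_of_le (l : List Int) (k : Nat) (x : Int) (p : Nat) (h : p ≤ k) :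
    buscaAux2 l k x p = buscaAux l k x := by
  induction l generalizing k with
  | nil => rfl
  | cons y ys ih =>
    simp only [buscaAux2, buscaAux]
    by_cases hx : y = x
    · simp [hx, h]
    · simp [hx, ih (k + 1) (by omega)]

theorem buscaAux2_skip (l : List Int) (k : Nat) (x : Int) (p : Nat) (h : k ≤ p) :
    buscaAux2 l k x p = buscaAux (l.drop (p - k)) p x := by
  induction l generalizing k with
  | nil => simp [buscaAux2, buscaAux]
  | cons y ys ih =>
    rcases eq_or_lt_of_le h with heq | hlt
    · subst heq
      simp only [Nat.sub_self, List.drop_zero]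
      exact buscaAux2_of_le _ _ _ _ (le_refl _)
    · simp only [buscaAux2, if_neg (show ¬ (y = x ∧ p ≤ k) by rintro ⟨_, h2⟩; omega)]
      rw [ih (k + 1) (by omega)]
      obtain ⟨d, hd⟩ : ∃ d, p - k = d + 1 := ⟨p - k - 1, by omega⟩
      have hdd : p - (k + 1) = d := by omega
      rw [hd, List.drop_succ_cons, hdd]

theorem busca_eq_aux2 (l : List Int) (x : Int) (p : Nat) :
    busca l x p = buscaAux2 l 0 x p := by
  rw [busca_eq_drop, buscaAux2_skip l 0 x p (Nat.zero_le p), Nat.sub_zero]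

-- B's positions dict looked up at x is the filtered index list of x in l1
theorem posIdx_getD (l1 : List Int) (x : Int) :
    (posIdx l1).getD x [] = ((l1.zipIdx.filter (fun q => q.1 == x)).map (·.2)) := by
  unfold posIdx
  rw [PySem.Dict.getD_foldl_modify_append]
  simp [PySem.Dict.getD_empty]

-- linear search over the filtered index list agrees with the bounded scan
theorem find_filter_eq_aux2 (l : List Int) (k : Nat) (x : Int) (p : Nat) :
    ((((l.zipIdx k).filter (fun q => q.1 == x)).map (·.2)).find? (fun i => decide (p ≤ i)))
      = buscaAux2 l k x p := by
  induction l generalizing k with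
  | nil => simp [buscaAux2]
  | cons y ys ih =>
    rw [List.zipIdx_cons]
    by_cases hx : y = x
    · by_cases hp : p ≤ k
      · simp [hx, buscaAux2, hp]
      · simp [hx, buscaAux2, hp, ih]
    · simp [hx, buscaAux2, ih]

-- the positions list is sorted (it is a sublist of range')
theorem posList_sorted (l1 : List Int) (x : Int) :
    ((l1.zipIdx.filter (fun q => q.1 == x)).map (·.2)).Pairwise (· ≤ ·) := by
  have hsub : ((l1.zipIdx.filter (fun q => q.1 == x)).map (·.2)).Sublist (l1.zipIdx.map (·.2)) :=
    List.Sublist.map _ List.filter_sublist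
  have hall : (l1.zipIdx.map (·.2)).Pairwise (· < ·) := by
    have h : (l1.zipIdx.map (·.2)) = List.range' 0 l1.length := List.zipIdx_map_snd 0 l1
    rw [h]
    exact List.pairwise_lt_range' ..
  exact ((hall.sublist hsub)).imp le_of_lt

-- binary-search correctness: bl returns the first index whose entry is ≥ p
theorem bl_spec (lst : List Nat) (p : Nat) (hs : lst.Pairwise (· ≤ ·)) (lo hi : Nat)
    (hlh : lo ≤ hi) (hhl : hi ≤ lst.length)
    (hlow : ∀ i, i < lo → lst.getD i 0 < p)
    (hhigh : ∀ i, hi ≤ i → i < lst.length → p ≤ lst.getD i 0) :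
    lo ≤ bl lst p lo hi ∧ bl lst p lo hi ≤ hi ∧
    (∀ i, i < bl lst p lo hi → lst.getD i 0 < p) ∧
    (∀ i, bl lst p lo hi ≤ i → i < lst.length → p ≤ lst.getD i 0) := by
  have hmono : ∀ i j, i ≤ j → j < lst.length → lst.getD i 0 ≤ lst.getD j 0 := by
    intro i j hij hj
    rcases eq_or_lt_of_le hij with h | h
    · subst h; exact le_refl _
    · rw [List.getD_eq_getElem lst 0 (by omega), List.getD_eq_getElem lst 0 hj]
      exact (List.pairwise_iff_getElem.mp hs) i j (by omega) hj h
  rw [bl_eq]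
  by_cases h : lo < hi
  · simp only [if_pos h]
    by_cases hc : lst.getD ((lo + hi) / 2) 0 < p
    · simp only [if_pos hc]
      have hrec := bl_spec lst p hs ((lo + hi) / 2 + 1) hi (by omega) hhl
        (fun i hi' => lt_of_le_of_lt (hmono i ((lo + hi) / 2) (by omega) (by omega)) hc)
        hhigh
      exact ⟨by omega, hrec.2.1, hrec.2.2.1, hrec.2.2.2⟩
    · simp only [if_neg hc]
      have hrec := bl_spec lst p hs lo ((lo + hi) / 2) (by omega) (by omega) hlow
        (fun i hi' hlen => le_trans (by omega) (hmono ((lo + hi) / 2) i hi' hlen))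
      exact ⟨hrec.1, by omega, hrec.2.2.1, hrec.2.2.2⟩
  · simp only [if_neg h]
    have : lo = hi := by omega
    exact ⟨by omega, by omega, hlow, fun i hi' hlen => hhigh i (by omega) hlen⟩
termination_by hi - lo
decreasing_by all_goals omega

-- find? on a list whose first entry ≥ p sits at index r
theorem find?_of_first (lst : List Nat) (p : Nat) (r : Nat)
    (h1 : ∀ i, i < r → lst.getD i 0 < p)
    (h2 : ∀ i, r ≤ i → i < lst.length → p ≤ lst.getD i 0)
    (h3 : r ≤ lst.length) :
    lst.find? (fun v => decide (p ≤ v)) = if r = lst.length then none else some (lst.getD r 0) := by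
  induction lst generalizing r with
  | nil =>
    have : r = 0 := by simpa using h3
    simp [this]
  | cons a l ih =>
    cases r with
    | zero =>
      have hp : p ≤ a := by simpa using h2 0 (le_refl _) (by simp)
      simp [hp]
    | succ r' =>
      have ha : a < p := by simpa using h1 0 (by omega)
      rw [List.find?_cons_of_neg (by simp; omega)]
      rw [ih r' (fun i hi' => by simpa using h1 (i + 1) (by omega))
        (fun i hi' hlen => by simpa using h2 (i + 1) (by omega) (by simp; omega))
        (by simpa using h3)]
      simp only [List.length_cons, List.getD_cons_succ]
      by_cases hr : r' = l.length
      · simp [hr]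
      · rw [if_neg hr, if_neg (by omega)]

-- bridge: B's dict + binary-search lookup equals A's linear scan from the pointer
theorem bridge (l1 : List Int) (x : Int) (p : Nat) :
    (if bl ((posIdx l1).getD x []) p 0 ((posIdx l1).getD x []).length
        = ((posIdx l1).getD x []).length
     then (none : Option Nat)
     else some (((posIdx l1).getD x []).getD
        (bl ((posIdx l1).getD x []) p 0 ((posIdx l1).getD x []).length) 0))
    = busca l1 x p := by
  have hsorted : ((posIdx l1).getD x []).Pairwise (· ≤ ·) := by
    rw [posIdx_getD]; exact posList_sorted l1 x
  obtain ⟨_, hle, h1, h2⟩ := bl_spec ((posIdx l1).getD x []) p hsorted 0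
    ((posIdx l1).getD x []).length (Nat.zero_le _) (le_refl _)
    (fun i hi' => by omega) (fun i hi' hlen => by omega)
  rw [← find?_of_first ((posIdx l1).getD x []) p _ h1 h2 hle]
  rw [posIdx_getD, find_filter_eq_aux2, ← busca_eq_aux2]

-- A's match counter never exceeds the number of processed l2 elements
theorem foldA_count_le (l1 : List Int) (l2 : List Int) (c p : Nat) :
    (List.foldl (fun (st : Nat × Nat) x =>
      match busca l1 x st.2 with
      | some j => (st.1 + 1, j)
      | none => st) (c, p) l2).1 ≤ c + l2.length := by
  induction l2 generalizing c p with
  | nil => simp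
  | cons x r ih =>
    have h2 := ih c p
    rw [List.foldl_cons]
    cases hb : busca l1 x p with
    | some j =>
      have h1 := ih (c + 1) j
      simp only [List.length_cons]
      simp
      omega
    | none =>
      simp only [List.length_cons]
      simp
      omega

-- main loop invariant: the counter reaches c + |l2| iff B's greedy walk succeeds
theorem foldA_iff_goAlt (l1 : List Int) (l2 : List Int) (c p : Nat) :
    ((List.foldl (fun (st : Nat × Nat) x =>
        match busca l1 x st.2 with
        | some j => (st.1 + 1, j)
        | none => st) (c, p) l2).1 = c + l2.length
      ↔ goAlt (posIdx l1) l2 p = true) := by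
  induction l2 generalizing c p with
  | nil => simp [goAlt]
  | cons x r ih =>
    rw [List.foldl_cons, goAlt]
    simp only []
    cases hb : busca l1 x p with
    | some j =>
      have hbr := bridge l1 x p
      rw [hb] at hbr
      by_cases hk : bl ((posIdx l1).getD x []) p 0 ((posIdx l1).getD x []).length
          = ((posIdx l1).getD x []).length
      · rw [if_pos hk] at hbr; exact absurd hbr (by simp)
      · rw [if_neg hk] at hbr
        have hj : ((posIdx l1).getD x []).getD
            (bl ((posIdx l1).getD x []) p 0 ((posIdx l1).getD x []).length) 0 = j := by
          simpa using hbr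
        rw [if_neg hk, hj]
        rw [show c + (x :: r).length = (c + 1) + r.length by simp only [List.length_cons]; omega]
        exact ih (c + 1) j
    | none =>
      have hbr := bridge l1 x p
      rw [hb] at hbr
      by_cases hk : bl ((posIdx l1).getD x []) p 0 ((posIdx l1).getD x []).length
          = ((posIdx l1).getD x []).length
      · rw [if_pos hk]
        constructor
        · intro hcount
          exfalso
          have := foldA_count_le l1 r c p
          simp at hcount
          omega
        · intro hfalse; exact absurd hfalse (by simp)
      · rw [if_neg hk] at hbr; exact absurd hbr (by simp)

-- ===== VERDICT (by name: the statement is the Claim_ definition above) =====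
theorem verifica_esteira_spec : Claim_equal_verifica_esteira := by
  intro l1 l2 _
  unfold Spec_verifica_esteira verifica_esteira verifica_esteira_alt
  simp only []
  by_cases h : (List.foldl (fun (st : Nat × Nat) x =>
      match busca l1 x st.2 with
      | some j => (st.1 + 1, j)
      | none => st) (0, 0) l2).1 = l2.length
  · rw [if_pos h]
    exact ((foldA_iff_goAlt l1 l2 0 0).mp (by simpa using h)).symm
  · rw [if_neg h]
    cases hg : goAlt (posIdx l1) l2 0 with
    | true => exact absurd (by simpa using (foldA_iff_goAlt l1 l2 0 0).mpr hg) h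
    | false => rfl
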